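-- pv_equiv track=rewrite | github.com/jarrodharvey/ace_llm_experiment | legacy/scripts/create_new_game_orchestrator.py | _create_case_summary
-- ===== SOURCE A (Python) =====
-- def _create_case_summary(content):
--     """Create a concise case summary from full legal content"""
--     # Extract key sections and limit length
--     lines = content.split('\n')
--
--     # Look for key legal sections
--     summary_lines = []
--     case_name = ""
--     charges = ""
--     facts = ""
--
--     # Extract case name
--     for line in lines[:50]:  # Check first 50 lines
--         if ' v ' in line and len(line.split()) < 10:
--             case_name = line.strip()
--             break
--
--     # Extract charges/offences
--     for i, line in enumerate(lines):
--         if any(term in line.lower() for term in ['charge', 'offence', 'count', 'conviction']):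
--             charges += line.strip() + " "
--             # Get next few lines for context
--             for j in range(1, 3):
--                 if i + j < len(lines):
--                     charges += lines[i + j].strip() + " "
--             break
--
--     # Extract basic facts (look for common legal section headers)
--     in_facts = False
--     fact_lines = 0
--     for line in lines:
--         if any(term in line.lower() for term in ['background', 'facts', 'evidence', 'circumstances']):
--             in_facts = True
--             continue
--         if in_facts and fact_lines < 20:  # Limit facts to 20 lines
--             facts += line.strip() + " "
--             fact_lines += 1
--
--     # Build summary
--     summary = f"Case: {case_name}\n\n"
--     if charges:
--         summary += f"Charges: {charges[:500]}...\n\n"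
--     if facts:
--         summary += f"Key Facts: {facts[:1000]}...\n\n"
--
--     # Add first 2000 chars of original content as fallback
--     if len(summary) < 500:
--         summary += content[:2000] + "..."
--
--     # Ensure reasonable length (max 3000 chars)
--     if len(summary) > 3000:
--         summary = summary[:3000] + "..."
--
--     return summary
-- ===== SOURCE B (Python) =====
-- def _create_case_summary(content):
--     """Create a concise case summary from full legal content (single-pass rewrite)"""
--     lines = content.split('\n')
--
--     case_name = None
--     charges = None
--     in_facts = False
--     fact_lines = 0
--     facts = ""
--
--     # One pass over the enumerated lines, maintaining all extraction state at once
--     for i, line in enumerate(lines):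
--         if case_name is None and i < 50 and ' v ' in line and len(line.split()) < 10:
--             case_name = line.strip()
--         if charges is None and any(term in line.lower() for term in ['charge', 'offence', 'count', 'conviction']):
--             charges = line.strip() + " "
--             for j in range(1, 3):
--                 if i + j < len(lines):
--                     charges += lines[i + j].strip() + " "
--         if any(term in line.lower() for term in ['background', 'facts', 'evidence', 'circumstances']):
--             in_facts = True
--         elif in_facts and fact_lines < 20:
--             facts += line.strip() + " "
--             fact_lines += 1
--
--     summary = f"Case: {case_name if case_name is not None else ''}\n\n"
--     if charges is not None:
--         summary += f"Charges: {charges[:500]}...\n\n"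
--     if facts:
--         summary += f"Key Facts: {facts[:1000]}...\n\n"
--
--     if len(summary) < 500:
--         summary += content[:2000] + "..."
--
--     if len(summary) > 3000:
--         summary = summary[:3000] + "..."
--
--     return summary
-- ===== Notes on version B (the rewrite author's own statement) =====
-- stated objective: alternative
-- what changed: The three separate scans of the lines (case name over the first 50 lines, charges scan with break, facts-section accumulator) are fused into a single enumerated pass that maintains all extraction state simultaneously.
import Mathlib
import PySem

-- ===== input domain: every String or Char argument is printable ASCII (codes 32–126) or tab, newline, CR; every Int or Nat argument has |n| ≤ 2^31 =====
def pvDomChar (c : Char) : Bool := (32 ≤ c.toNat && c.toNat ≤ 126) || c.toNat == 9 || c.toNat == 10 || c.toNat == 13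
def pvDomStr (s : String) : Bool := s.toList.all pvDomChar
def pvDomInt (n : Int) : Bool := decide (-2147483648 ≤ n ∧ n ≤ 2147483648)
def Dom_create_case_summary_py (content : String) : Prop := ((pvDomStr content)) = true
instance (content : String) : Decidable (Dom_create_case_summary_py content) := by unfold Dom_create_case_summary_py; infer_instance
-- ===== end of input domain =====

-- B fuses A's three separate scans of the lines into a single enumerated pass that
-- maintains all extraction state at once; same cost, different decomposition ("alternative").

-- ===== PORT A =====
-- shared condition/fragment helpers (identical Python expressions appear in A and in B)
def pvCaseCond (line : List Char) : Bool :=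
  PySem.Chars.isIn " v ".toList line && decide ((PySem.Chars.split₀ line).length < 10)

def pvChargeCond (line : List Char) : Bool :=
  ["charge".toList, "offence".toList, "count".toList, "conviction".toList].any
    (fun t => PySem.Chars.isIn t (PySem.Chars.lower line))

def pvFactCond (line : List Char) : Bool :=
  ["background".toList, "facts".toList, "evidence".toList, "circumstances".toList].any
    (fun t => PySem.Chars.isIn t (PySem.Chars.lower line))

-- charges text built on a matching line i: line.strip()+" " then the j in range(1,3) loop
-- (lines[i+j] is guarded by i+j < len(lines), so pyGetD with default [] is exact)
def pvChargeText (lines : List (List Char)) (i : Int) (line : List Char) : List Char :=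
  (PySem.List.pyRange 1 3 1).foldl
    (fun acc j =>
      if i + j < (lines.length : Int) then
        acc ++ PySem.Chars.strip (PySem.List.pyGetD lines (i + j) []) ++ [' ']
      else acc)
    (PySem.Chars.strip line ++ [' '])

-- the facts-loop body (A's 'continue' form = B's if/elif form, one step)
def pvFactStep (s : Bool × Int × List Char) (line : List Char) : Bool × Int × List Char :=
  if pvFactCond line then (true, s.2.1, s.2.2)
  else if s.1 && decide (s.2.1 < 20) then (s.1, s.2.1 + 1, s.2.2 ++ PySem.Chars.strip line ++ [' '])
  else s

-- A's first loop: over lines[:50], break on first match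
def pvCaseScanA : List (List Char) → List Char
  | [] => []
  | l :: ls => if pvCaseCond l then PySem.Chars.strip l else pvCaseScanA ls

-- A's second loop: over enumerate(lines), break on first match
def pvChargeScanA (lines : List (List Char)) : List (Int × List Char) → List Char
  | [] => []
  | (i, l) :: rest => if pvChargeCond l then pvChargeText lines i l else pvChargeScanA lines rest

def create_case_summary_py (content : String) : String :=
  let cs := content.toList
  let lines := PySem.Chars.splitOn cs ['\n']
  let case_name := pvCaseScanA (PySem.List.slice lines none (some 50))
  let charges := pvChargeScanA lines (PySem.List.enumerate lines 0)
  let facts := (lines.foldl pvFactStep (false, 0, [])).2.2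
  let summary := "Case: ".toList ++ case_name ++ "\n\n".toList
  let summary := if charges ≠ [] then summary ++ "Charges: ".toList ++ PySem.List.slice charges none (some 500) ++ "...\n\n".toList else summary
  let summary := if facts ≠ [] then summary ++ "Key Facts: ".toList ++ PySem.List.slice facts none (some 1000) ++ "...\n\n".toList else summary
  let summary := if (summary.length : Int) < 500 then summary ++ PySem.List.slice cs none (some 2000) ++ "...".toList else summary
  let summary := if (summary.length : Int) > 3000 then PySem.List.slice summary none (some 3000) ++ "...".toList else summary
  String.ofList summary

-- ===== PORT B =====
-- the three independent per-line updates of Source B's single loop body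
def pvCaseStepB (acc : Option (List Char)) (p : Int × List Char) : Option (List Char) :=
  match acc with
  | some v => some v
  | none => if decide (p.1 < 50) && pvCaseCond p.2 then some (PySem.Chars.strip p.2) else none

def pvChargeStepB (lines : List (List Char)) (acc : Option (List Char)) (p : Int × List Char) : Option (List Char) :=
  match acc with
  | some v => some v
  | none => if pvChargeCond p.2 then some (pvChargeText lines p.1 p.2) else none

def pvStepB (lines : List (List Char))
    (s : Option (List Char) × Option (List Char) × Bool × Int × List Char)
    (p : Int × List Char) :
    Option (List Char) × Option (List Char) × Bool × Int × List Char :=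
  (pvCaseStepB s.1 p, pvChargeStepB lines s.2.1 p, pvFactStep s.2.2 p.2)

def create_case_summary_py_alt (content : String) : String :=
  let cs := content.toList
  let lines := PySem.Chars.splitOn cs ['\n']
  let st := (PySem.List.enumerate lines 0).foldl (pvStepB lines) (none, none, false, 0, [])
  let case_name := st.1.getD []
  let facts := st.2.2.2.2
  let summary := "Case: ".toList ++ case_name ++ "\n\n".toList
  let summary := match st.2.1 with
    | some c => summary ++ "Charges: ".toList ++ PySem.List.slice c none (some 500) ++ "...\n\n".toList
    | none => summary
  let summary := if facts ≠ [] then summary ++ "Key Facts: ".toList ++ PySem.List.slice facts none (some 1000) ++ "...\n\n".toList else summary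
  let summary := if (summary.length : Int) < 500 then summary ++ PySem.List.slice cs none (some 2000) ++ "...".toList else summary
  let summary := if (summary.length : Int) > 3000 then PySem.List.slice summary none (some 3000) ++ "...".toList else summary
  String.ofList summary

-- ===== PRECONDITION & SPEC =====
def Spec_create_case_summary_py (content : String) (out : String) : Prop := out = create_case_summary_py_alt content
instance (content : String) (out : String) : Decidable (Spec_create_case_summary_py content out) := by unfold Spec_create_case_summary_py; infer_instance

-- ===== CLAIM (what is proved, stated in full; the proofs are below) =====
def Claim_equal_create_case_summary_py : Prop := ∀ (content : String), Dom_create_case_summary_py content → Spec_create_case_summary_py content (create_case_summary_py content)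

-- ===== LEMMAS AND PROOFS =====
-- first-match formulations of the two break loops, used to relate the folds to A's recursions
def pvCaseOpt : List (List Char) → Option (List Char)
  | [] => none
  | l :: ls => if pvCaseCond l then some (PySem.Chars.strip l) else pvCaseOpt ls

def pvChOpt (lines : List (List Char)) : List (Int × List Char) → Option (List Char)
  | [] => none
  | (i, l) :: rest => if pvChargeCond l then some (pvChargeText lines i l) else pvChOpt lines rest

theorem pv_foldl_prod {α β γ : Type} (f : α → γ → α) (g : β → γ → β)
    (l : List γ) (a : α) (b : β) :
    l.foldl (fun s x => (f s.1 x, g s.2 x)) (a, b) = (l.foldl f a, l.foldl g b) := by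
  induction l generalizing a b with
  | nil => rfl
  | cons x xs ih => simp [List.foldl_cons, ih]

theorem pv_stepB_split (lines : List (List Char)) (en : List (Int × List Char))
    (a b : Option (List Char)) (c : Bool × Int × List Char) :
    en.foldl (pvStepB lines) (a, b, c) =
      (en.foldl pvCaseStepB a,
       en.foldl (pvChargeStepB lines) b,
       en.foldl (fun s p => pvFactStep s p.2) c) := by
  have h := pv_foldl_prod pvCaseStepB
      (fun (s : Option (List Char) × Bool × Int × List Char) (p : Int × List Char) =>
        (pvChargeStepB lines s.1 p, pvFactStep s.2 p.2)) en a (b, c)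
  have h2 := pv_foldl_prod (pvChargeStepB lines)
      (fun (s : Bool × Int × List Char) (p : Int × List Char) => pvFactStep s p.2) en b c
  calc en.foldl (pvStepB lines) (a, b, c)
      = en.foldl (fun s x => (pvCaseStepB s.1 x,
          (fun (s : Option (List Char) × Bool × Int × List Char) (p : Int × List Char) =>
            (pvChargeStepB lines s.1 p, pvFactStep s.2 p.2)) s.2 x)) (a, (b, c)) := rfl
    _ = _ := by rw [h, h2]

theorem pv_caseStep_some (en : List (Int × List Char)) (v : List Char) :
    en.foldl pvCaseStepB (some v) = some v := by
  induction en with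
  | nil => rfl
  | cons p ps ih => simpa [List.foldl_cons, pvCaseStepB] using ih

theorem pv_caseFold (ls : List (List Char)) (s : ℕ) :
    (PySem.List.enumerate ls (s : Int)).foldl pvCaseStepB none = pvCaseOpt (ls.take (50 - s)) := by
  induction ls generalizing s with
  | nil => simp [PySem.List.enumerate_nil, pvCaseOpt]
  | cons l ls ih =>
    rw [PySem.List.enumerate_cons, List.foldl_cons]
    have hstep : ((s : Int) + 1) = ((s + 1 : ℕ) : Int) := by push_cast; ring
    by_cases hs : s < 50
    · have hs' : ((s : Int) < 50) := by exact_mod_cast hs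
      have h50 : 50 - s = (50 - (s + 1)) + 1 := by omega
      rw [h50, List.take_succ_cons]
      by_cases hc : pvCaseCond l
      · rw [show pvCaseStepB none ((s : Int), l) = some (PySem.Chars.strip l) by
            simp [pvCaseStepB, hs', hc]]
        rw [pv_caseStep_some]
        simp [pvCaseOpt, hc]
      · rw [show pvCaseStepB none ((s : Int), l) = none by simp [pvCaseStepB, hc]]
        rw [hstep, ih (s + 1)]
        simp [pvCaseOpt, hc]
    · have hs' : ¬ ((s : Int) < 50) := by exact_mod_cast hs
      rw [show pvCaseStepB none ((s : Int), l) = none by simp [pvCaseStepB, hs']]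
      rw [hstep, ih (s + 1)]
      have h0 : 50 - s = 0 := by omega
      have h1 : 50 - (s + 1) = 0 := by omega
      rw [h0, h1]
      simp

theorem pv_caseScanA_eq (ls : List (List Char)) :
    pvCaseScanA ls = (pvCaseOpt ls).getD [] := by
  induction ls with
  | nil => rfl
  | cons l t ih =>
    by_cases hc : pvCaseCond l <;> simp [pvCaseScanA, pvCaseOpt, hc, ih]

theorem pv_chargeStep_some (lines : List (List Char)) (en : List (Int × List Char)) (v : List Char) :
    en.foldl (pvChargeStepB lines) (some v) = some v := by
  induction en with
  | nil => rfl
  | cons p ps ih => simpa [List.foldl_cons, pvChargeStepB] using ih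

theorem pv_chargeFold (lines : List (List Char)) (en : List (Int × List Char)) :
    en.foldl (pvChargeStepB lines) none = pvChOpt lines en := by
  induction en with
  | nil => rfl
  | cons p ps ih =>
    obtain ⟨i, l⟩ := p
    by_cases hc : pvChargeCond l
    · simp [List.foldl_cons, pvChargeStepB, pvChOpt, hc, pv_chargeStep_some]
    · simp [List.foldl_cons, pvChargeStepB, pvChOpt, hc, ih]

theorem pv_chargeScanA_eq (lines : List (List Char)) (en : List (Int × List Char)) :
    pvChargeScanA lines en = (pvChOpt lines en).getD [] := by
  induction en with
  | nil => rfl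
  | cons p ps ih =>
    obtain ⟨i, l⟩ := p
    by_cases hc : pvChargeCond l <;> simp [pvChargeScanA, pvChOpt, hc, ih]

theorem pv_chargeText_ne_nil (lines : List (List Char)) (i : Int) (line : List Char) :
    pvChargeText lines i line ≠ [] := by
  have hr : PySem.List.pyRange 1 3 1 = [1, 2] := by decide
  unfold pvChargeText
  rw [hr]
  simp only [List.foldl_cons, List.foldl_nil]
  split_ifs <;> simp

theorem pv_chOpt_ne_nil (lines : List (List Char)) (en : List (Int × List Char)) (c : List Char)
    (h : pvChOpt lines en = some c) : c ≠ [] := by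
  induction en with
  | nil => simp [pvChOpt] at h
  | cons p ps ih =>
    obtain ⟨i, l⟩ := p
    by_cases hc : pvChargeCond l
    · simp [pvChOpt, hc] at h
      subst h
      exact pv_chargeText_ne_nil lines i l
    · exact ih (by simpa [pvChOpt, hc] using h)

theorem pv_factFold (en : List (Int × List Char)) (c : Bool × Int × List Char) :
    en.foldl (fun s p => pvFactStep s p.2) c = (en.map (·.2)).foldl pvFactStep c := by
  rw [List.foldl_map]

-- ===== VERDICT (by name: the statement is the Claim_ definition above) =====
theorem create_case_summary_py_spec : Claim_equal_create_case_summary_py := by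
  intro content _
  show create_case_summary_py content = create_case_summary_py_alt content
  simp only [create_case_summary_py, create_case_summary_py_alt]
  set cs := content.toList with hcs
  set lines := PySem.Chars.splitOn cs ['\n'] with hlines
  rw [pv_stepB_split]
  have hcase : (PySem.List.enumerate lines 0).foldl pvCaseStepB none
      = pvCaseOpt (lines.take 50) := by
    have := pv_caseFold lines 0
    simpa using this
  have hcaseA : pvCaseScanA (PySem.List.slice lines none (some 50))
      = (pvCaseOpt (lines.take 50)).getD [] := by
    rw [PySem.List.slice_to lines (by norm_num : (0:Int) ≤ 50),
        show ((50 : Int).toNat) = 50 from rfl, pv_caseScanA_eq]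
  have hch : (PySem.List.enumerate lines 0).foldl (pvChargeStepB lines) none
      = pvChOpt lines (PySem.List.enumerate lines 0) := pv_chargeFold lines _
  have hfact : (PySem.List.enumerate lines 0).foldl (fun s p => pvFactStep s p.2) (false, 0, [])
      = lines.foldl pvFactStep (false, 0, []) := by
    rw [pv_factFold, PySem.List.map_snd_enumerate]
  simp only [hcase, hcaseA, hch, hfact, pv_chargeScanA_eq]
  cases hco : pvChOpt lines (PySem.List.enumerate lines 0) with
  | none => simp
  | some c =>
    have hne : c ≠ [] := pv_chOpt_ne_nil lines _ c hco
    simp [hne]
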